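-- pv_equiv track=rewrite | github.com/himanshushukla12/Code_breaking_using_intelligent_differential_attacks | Playfair.py | append_strings
-- ===== SOURCE A (Python) =====
-- def append_strings(strings):
--     output = []
--     for i in range(len(strings)):
--         chosen = strings[i]
--         for j in range(len(strings)):
--             if i != j and chosen[:2] == strings[j][-2:]:
--                 output.append(strings[j] + chosen[2:])
--     return output
-- ===== SOURCE B (Python) =====
-- def append_strings(strings):
--     index = {}
--     for j, s in enumerate(strings):
--         index.setdefault(s[-2:], []).append(j)
--     output = []
--     for i, chosen in enumerate(strings):
--         for j in index.get(chosen[:2], []):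
--             if j != i:
--                 output.append(strings[j] + chosen[2:])
--     return output
-- ===== Notes on version B (the rewrite author's own statement) =====
-- stated objective: faster
-- what changed: Replaced the O(n^2) all-pairs scan by a single pass that buckets string indices under their last-two-character key in a dict, then for each string looks up its first-two-character key, so only actual matches are visited.
import Mathlib
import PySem

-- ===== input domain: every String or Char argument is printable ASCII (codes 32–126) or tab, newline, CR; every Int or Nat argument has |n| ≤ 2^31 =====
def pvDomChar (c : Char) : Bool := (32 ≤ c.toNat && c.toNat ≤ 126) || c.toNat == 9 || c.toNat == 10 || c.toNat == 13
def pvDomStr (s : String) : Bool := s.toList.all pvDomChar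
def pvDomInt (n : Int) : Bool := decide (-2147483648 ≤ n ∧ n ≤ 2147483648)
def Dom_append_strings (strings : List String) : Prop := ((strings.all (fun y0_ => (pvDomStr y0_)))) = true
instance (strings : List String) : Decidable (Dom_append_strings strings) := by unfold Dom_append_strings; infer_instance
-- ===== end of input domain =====

-- B replaces A's O(n^2) all-pairs scan by a dict that buckets indices under the last-two-character
-- key, then one lookup per string (objective: faster; a timing run measures it).

-- ===== PORT A =====
-- literal transliteration of A: nested loops over range(len(strings)), append on match
def append_strings (strings : List String) : List String :=
  (PySem.List.pyRange 0 (PySem.List.len strings)).foldl (fun output i =>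
    let chosen := PySem.List.pyGetD strings i ""
    (PySem.List.pyRange 0 (PySem.List.len strings)).foldl (fun output j =>
      if i ≠ j ∧ PySem.Str.slice chosen none (some 2)
               = PySem.Str.slice (PySem.List.pyGetD strings j "") (some (-2)) none then
        output ++ [String.ofList ((PySem.List.pyGetD strings j "").toList
                    ++ (PySem.Str.slice chosen (some 2) none).toList)]
      else output) output) []

-- ===== PORT B =====
-- literal transliteration of B: build index[s[-2:]] = ordered list of indices, then look up chosen[:2]
def append_strings_alt (strings : List String) : List String :=
  let index : PySem.Dict String (List Int) :=
    (PySem.List.enumerate strings).foldl (fun d p =>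
      d.modify (PySem.Str.slice p.2 (some (-2)) none) [] (fun l => l ++ [p.1]))
      PySem.Dict.empty
  (PySem.List.enumerate strings).foldl (fun output p =>
    (index.getD (PySem.Str.slice p.2 none (some 2)) []).foldl (fun output j =>
      if j ≠ p.1 then
        output ++ [String.ofList ((PySem.List.pyGetD strings j "").toList
                    ++ (PySem.Str.slice p.2 (some 2) none).toList)]
      else output) output) []

-- ===== PRECONDITION & SPEC =====
def Spec_append_strings (strings : List String) (out : List String) : Prop := out = append_strings_alt strings
instance (strings : List String) (out : List String) : Decidable (Spec_append_strings strings out) := by unfold Spec_append_strings; infer_instance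

-- ===== CLAIM (what is proved, stated in full; the proofs are below) =====
def Claim_equal_append_strings : Prop := ∀ (strings : List String), Dom_append_strings strings → Spec_append_strings strings (append_strings strings)

-- ===== LEMMAS AND PROOFS =====

-- the index fold: looking up k yields, in order, the indices of the strings whose last-two-char key is k
theorem pvIndex_getD (l : List (Int × String)) (d : PySem.Dict String (List Int)) (k : String) :
    (l.foldl (fun d p =>
        d.modify (PySem.Str.slice p.2 (some (-2)) none) [] (fun xs => xs ++ [p.1])) d).getD k []
      = d.getD k [] ++ (l.filter (fun p => PySem.Str.slice p.2 (some (-2)) none == k)).map Prod.fst := by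
  induction l generalizing d with
  | nil => simp
  | cons a t ih =>
    simp only [List.foldl_cons, List.filter_cons]
    rw [ih]
    by_cases h : PySem.Str.slice a.2 (some (-2)) none = k
    · simp [PySem.Dict.modify, h]
    · simp [PySem.Dict.modify, PySem.Dict.getD_insert, h, Ne.symm h]

-- A as a flatMap over the index range
theorem pvA_shape (strings : List String) :
    append_strings strings
      = (PySem.List.pyRange 0 (PySem.List.len strings)).flatMap (fun i =>
          ((PySem.List.pyRange 0 (PySem.List.len strings)).filter (fun j =>
              decide (i ≠ j ∧ PySem.Str.slice (PySem.List.pyGetD strings i "") none (some 2)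
                = PySem.Str.slice (PySem.List.pyGetD strings j "") (some (-2)) none))).map (fun j =>
            String.ofList ((PySem.List.pyGetD strings j "").toList
              ++ (PySem.Str.slice (PySem.List.pyGetD strings i "") (some 2) none).toList))) := by
  unfold append_strings
  rw [show (fun (output : List String) (i : Int) =>
        (PySem.List.pyRange 0 (PySem.List.len strings)).foldl (fun output j =>
          if i ≠ j ∧ PySem.Str.slice (PySem.List.pyGetD strings i "") none (some 2)
                   = PySem.Str.slice (PySem.List.pyGetD strings j "") (some (-2)) none then
            output ++ [String.ofList ((PySem.List.pyGetD strings j "").toList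
                        ++ (PySem.Str.slice (PySem.List.pyGetD strings i "") (some 2) none).toList)]
          else output) output)
      = (fun output i => output ++ _) from funext fun output => funext fun i =>
        PySem.List.foldl_append_ite _ _ _ _]
  exact PySem.List.foldl_append_eq_flatMap _ _ _

-- B as a flatMap over the same range
theorem pvB_shape (strings : List String) :
    append_strings_alt strings
      = (PySem.List.pyRange 0 (PySem.List.len strings)).flatMap (fun i =>
          (((PySem.List.pyRange 0 (PySem.List.len strings)).filter (fun j =>
              PySem.Str.slice (PySem.List.pyGetD strings j "") (some (-2)) none
                == PySem.Str.slice (PySem.List.pyGetD strings i "") none (some 2))).filter (fun j =>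
              decide (j ≠ i))).map (fun j =>
            String.ofList ((PySem.List.pyGetD strings j "").toList
              ++ (PySem.Str.slice (PySem.List.pyGetD strings i "") (some 2) none).toList))) := by
  unfold append_strings_alt
  have hidx : ∀ k : String,
      (((PySem.List.enumerate strings).foldl (fun d p =>
          d.modify (PySem.Str.slice p.2 (some (-2)) none) [] (fun l => l ++ [p.1]))
          PySem.Dict.empty).getD k [])
        = (PySem.List.pyRange 0 (PySem.List.len strings)).filter (fun j =>
            PySem.Str.slice (PySem.List.pyGetD strings j "") (some (-2)) none == k) := by
    intro k
    rw [pvIndex_getD, PySem.List.enumerate_eq_map_pyRange strings "", List.filter_map]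
    simp [Function.comp_def]
  simp only [hidx]
  rw [show (fun (output : List String) (p : Int × String) =>
        ((PySem.List.pyRange 0 (PySem.List.len strings)).filter (fun j =>
            PySem.Str.slice (PySem.List.pyGetD strings j "") (some (-2)) none
              == PySem.Str.slice p.2 none (some 2))).foldl (fun output j =>
          if j ≠ p.1 then
            output ++ [String.ofList ((PySem.List.pyGetD strings j "").toList
                        ++ (PySem.Str.slice p.2 (some 2) none).toList)]
          else output) output)
      = (fun output p => output ++ _) from funext fun output => funext fun p =>
        PySem.List.foldl_append_ite _ _ _ _]
  rw [PySem.List.foldl_append_eq_flatMap, PySem.List.enumerate_eq_map_pyRange strings "",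
    List.flatMap_map]
  simp

-- ===== VERDICT (by name: the statement is the Claim_ definition above) =====
theorem append_strings_spec : Claim_equal_append_strings := by
  intro strings _
  unfold Spec_append_strings
  rw [pvA_shape, pvB_shape]
  refine congrArg (fun g => List.flatMap g _) (funext fun i => ?_)
  rw [List.filter_filter]
  refine congrArg (List.map _) (List.filter_congr fun j _ => ?_)
  by_cases h1 : i = j <;>
    by_cases h2 : PySem.Str.slice (PySem.List.pyGetD strings i "") none (some 2)
      = PySem.Str.slice (PySem.List.pyGetD strings j "") (some (-2)) none
  · simp [h1]
  · simp [h1]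
  · have h1' : ¬ j = i := fun h => h1 h.symm
    rw [h2]
    simp [h1']
    exact h1
  · have hb : (PySem.Str.slice (PySem.List.pyGetD strings j "") (some (-2)) none
        == PySem.Str.slice (PySem.List.pyGetD strings i "") none (some 2)) = false :=
      beq_eq_false_iff_ne.mpr (fun h => h2 h.symm)
    simp [h1, h2, hb]
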